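-- pv_equiv track=rewrite | github.com/zionia4758/programmers | level3/스타 수열.py | solution
-- ===== SOURCE A (Python) =====
-- from collections import Counter
-- from collections import defaultdict as dd
--
-- def solution(a):
--     answer = -1
--     val_idx = dd(list)
--     for i,v in enumerate(a):
--         val_idx[v].append(i)
--
--     a_len = len(a)
--     cnt_map = Counter(a).most_common()
--     for v,v_cnt in cnt_map:
--         idx_list = val_idx[v]
--         start = 0
--         cnt = 0
--         if answer >= v_cnt*2:
--             break
--         for idx in idx_list:
--             if start<idx and a[idx-1]!=v:
--                 cnt += 2
--                 start = idx+1
--             elif idx+1<a_len and a[idx+1]!=v: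
--                 start = idx+2
--                 cnt += 2
--
--         answer = max(cnt,answer)
--
--
--
--
--     return answer
-- ===== SOURCE B (Python) =====
-- def solution(a):
--     answer = -1
--     n = len(a)
--     for v in set(a):
--         cnt = 0
--         i = 0
--         while i + 1 < n:
--             if a[i] != a[i + 1] and (a[i] == v or a[i + 1] == v):
--                 cnt += 2
--                 i += 2
--             else:
--                 i += 1
--         answer = max(answer, cnt)
--     return answer
-- ===== Notes on version B (the rewrite author's own statement) =====
-- stated objective: simpler
-- what changed: Drops the val_idx index-map, the Counter.most_common frequency sort and the early break; for each distinct value it does one plain left-to-right adjacent-pair scan of the whole array, which provably yields the same greedy pair count as A's per-value index-list scan with left/right-neighbour logic.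
import Mathlib
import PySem

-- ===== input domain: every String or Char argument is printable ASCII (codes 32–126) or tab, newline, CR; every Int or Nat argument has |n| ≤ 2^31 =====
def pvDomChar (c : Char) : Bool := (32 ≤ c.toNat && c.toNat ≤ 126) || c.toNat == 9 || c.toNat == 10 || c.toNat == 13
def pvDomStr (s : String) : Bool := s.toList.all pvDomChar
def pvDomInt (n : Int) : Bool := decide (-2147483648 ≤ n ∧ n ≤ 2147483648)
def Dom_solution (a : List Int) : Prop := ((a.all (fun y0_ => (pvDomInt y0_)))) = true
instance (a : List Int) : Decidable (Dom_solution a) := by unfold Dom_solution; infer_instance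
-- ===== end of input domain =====

-- B replaces A's index-map + frequency-sorted loop (with break) by one plain adjacent-pair scan
-- per distinct value (objective: simpler).

-- ===== PORT A =====
-- val_idx = defaultdict(list); for i,v in enumerate(a): val_idx[v].append(i)
def solutionValIdx (a : List Int) : PySem.Dict Int (List Int) :=
  (PySem.List.enumerate a 0).foldl (fun d p => d.modify p.2 [] (fun l => l ++ [p.1])) PySem.Dict.empty

-- body of 'for idx in idx_list'; a[idx-1]/a[idx+1] are read only at in-range indices (guarded by
-- 'start<idx' resp. 'idx+1<a_len' with 0 ≤ start and idx from enumerate), so pyGetD is exact here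
def solutionStep (a : List Int) (v : Int) (st : Int × Int) (idx : Int) : Int × Int :=
  if st.1 < idx ∧ PySem.List.pyGetD a (idx - 1) 0 ≠ v then (idx + 1, st.2 + 2)
  else if idx + 1 < (a.length : Int) ∧ PySem.List.pyGetD a (idx + 1) 0 ≠ v then (idx + 2, st.2 + 2)
  else st

-- 'for v,v_cnt in cnt_map' with its break ('val_idx[v]' is a plain lookup here: every key of
-- Counter(a) is already present in the defaultdict, so no insertion can happen)
def solutionOuter (a : List Int) (valIdx : PySem.Dict Int (List Int)) (answer : Int) :
    List (Int × Int) → Int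
  | [] => answer
  | (v, vcnt) :: rest =>
    if answer ≥ vcnt * 2 then answer
    else
      let cnt := ((valIdx.getD v []).foldl (solutionStep a v) (0, 0)).2
      solutionOuter a valIdx (max cnt answer) rest

def solution (a : List Int) : Int :=
  -- Counter(a).most_common() = sorted(Counter(a).items(), key=count, reverse=True), stable
  solutionOuter a (solutionValIdx a) (-1)
    (PySem.List.sorted (PySem.Dict.items (PySem.Dict.counter a)) (fun p => p.2) true)

-- ===== PORT B =====
-- the 'while i + 1 < n' adjacent-pair scan for one value v, as the obvious recursion on the
-- rest of the list (i += 2 drops two elements, i += 1 drops one), cnt as accumulator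
def solutionScan (v : Int) : List Int → Int → Int
  | x :: y :: t, cnt =>
      if x ≠ y ∧ (x = v ∨ y = v) then solutionScan v t (cnt + 2) else solutionScan v (y :: t) cnt
  | _, cnt => cnt

def solution_alt (a : List Int) : Int :=
  (PySem.Set.ofList a).foldl (fun answer v => max answer (solutionScan v a 0)) (-1)

-- ===== PRECONDITION & SPEC =====
def Spec_solution (a : List Int) (out : Int) : Prop := out = solution_alt a
instance (a : List Int) (out : Int) : Decidable (Spec_solution a out) := by unfold Spec_solution; infer_instance

-- ===== CLAIM (what is proved, stated in full; the proofs are below) =====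
def Claim_equal_solution : Prop := ∀ (a : List Int), Dom_solution a → Spec_solution a (solution a)

-- ===== LEMMAS AND PROOFS =====

-- the common abstraction of both per-value scans: walk the suffix once; b says whether the element
-- just before the current suffix exists, is still unused and is ≠ v
def pvG (v : Int) : Bool → List Int → Int
  | b, x :: t =>
    if x = v ∧ b = true then 2 + pvG v false t
    else
      match t with
      | y :: t' => if x = v ∧ y ≠ v then 2 + pvG v false t' else pvG v (x != v) (y :: t')
      | [] => 0
  | _, [] => 0

theorem pvG_nil (v : Int) (b : Bool) : pvG v b [] = 0 := rfl

theorem pvG_left (v : Int) (x : Int) (t : List Int) (hx : x = v) :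
    pvG v true (x :: t) = 2 + pvG v false t := by
  subst hx; rw [pvG.eq_def]; simp

theorem pvG_cons_ne (v x : Int) (b : Bool) (r : List Int) (hx : x ≠ v) :
    pvG v b (x :: r) = pvG v true r := by
  have hbv : (x != v) = true := by simp [hx]
  cases r with
  | nil =>
    rw [pvG.eq_def]; simp [hx]
    rw [pvG.eq_def]
  | cons y r' =>
    rw [pvG.eq_def]; simp [hx, hbv]

theorem pvG_single (v x : Int) (hx : x = v) : pvG v false [x] = 0 := by rw [pvG.eq_def]; simp

theorem pvG_right (v x y : Int) (r : List Int) (hx : x = v) (hy : y ≠ v) :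
    pvG v false (x :: y :: r) = 2 + pvG v false r := by rw [pvG.eq_def]; simp [hx, hy]

theorem pvG_skip (v x y : Int) (r : List Int) (hx : x = v) (hy : y = v) :
    pvG v false (x :: y :: r) = pvG v false (y :: r) := by rw [pvG.eq_def]; simp [hx, hy]

-- B's scan computes pvG
theorem scan_eq_pvG (v : Int) :
    ∀ (n : ℕ) (l : List Int), l.length ≤ n → ∀ (c : Int), solutionScan v l c = c + pvG v false l := by
  intro n
  induction n with
  | zero =>
    intro l hl c
    cases l with
    | nil => simp [solutionScan, pvG_nil]
    | cons x t => simp at hl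
  | succ n ih =>
    intro l hl c
    match l with
    | [] => simp [solutionScan, pvG_nil]
    | [x] => simp [solutionScan, pvG]
    | x :: y :: t =>
      by_cases hx : x = v
      · by_cases hy : y = v
        · have hxy : ¬(x ≠ y ∧ (x = v ∨ y = v)) := by simp [hx, hy]
          rw [solutionScan, if_neg hxy, pvG_skip v x y t hx hy]
          exact ih (y :: t) (by simp at hl ⊢; omega) c
        · have hxy : (x ≠ y ∧ (x = v ∨ y = v)) := by
            constructor
            · intro h; exact hy (h ▸ hx)
            · exact Or.inl hx
          rw [solutionScan, if_pos hxy, pvG_right v x y t hx hy,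
            ih t (by simp at hl ⊢; omega) (c + 2)]
          ring
      · by_cases hy : y = v
        · have hxy : (x ≠ y ∧ (x = v ∨ y = v)) := by
            refine ⟨fun h => hx (h ▸ hy.symm ▸ rfl), Or.inr hy⟩
          rw [solutionScan, if_pos hxy, pvG_cons_ne v x false (y :: t) hx,
            pvG_left v y t hy, ih t (by simp at hl ⊢; omega) (c + 2)]
          ring
        · have hxy : ¬(x ≠ y ∧ (x = v ∨ y = v)) := by
            rintro ⟨-, h | h⟩
            exacts [hx h, hy h]
          rw [solutionScan, if_neg hxy, pvG_cons_ne v x false (y :: t) hx,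
            pvG_cons_ne v y true t hy, ← pvG_cons_ne v y false t hy]
          exact ih (y :: t) (by simp at hl ⊢; omega) c

-- each counted pair uses one occurrence of v
theorem pvG_le (v : Int) :
    ∀ (n : ℕ) (l : List Int), l.length ≤ n → ∀ (b : Bool), pvG v b l ≤ 2 * (l.count v : Int) := by
  intro n
  induction n with
  | zero =>
    intro l hl b
    cases l with
    | nil => simp [pvG_nil]
    | cons x t => simp at hl
  | succ n ih =>
    intro l hl b
    match l with
    | [] => simp [pvG_nil]
    | x :: t =>
      by_cases hx : x = v
      · cases b with
        | true =>
          rw [pvG_left v x t hx]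
          have := ih t (by simp at hl ⊢; omega) false
          have hc : (x :: t).count v = t.count v + 1 := by simp [hx]
          rw [hc]; push_cast; omega
        | false =>
          match t with
          | [] => rw [pvG_single v x hx]; positivity
          | y :: t' =>
            by_cases hy : y = v
            · rw [pvG_skip v x y t' hx hy]
              have := ih (y :: t') (by simp at hl ⊢; omega) false
              have hc : (x :: y :: t').count v = (y :: t').count v + 1 := by
                simp [hx]
              rw [hc]; push_cast; omega
            · rw [pvG_right v x y t' hx hy]
              have := ih t' (by simp at hl ⊢; omega) false
              have hc : (x :: y :: t').count v = t'.count v + 1 := by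
                simp [hx, hy]
              rw [hc]; push_cast; omega
      · rw [pvG_cons_ne v x b t hx]
        have := ih t (by simp at hl ⊢; omega) true
        have hc : (x :: t).count v = t.count v := by simp [hx]
        rw [hc]; omega

-- the defaultdict-building loop: getD of the result is getD of the start plus the new indices
theorem foldModify_getD :
    ∀ (l : List (Int × Int)) (d : PySem.Dict Int (List Int)) (v : Int),
      (l.foldl (fun d p => d.modify p.2 [] (fun xs => xs ++ [p.1])) d).getD v []
        = d.getD v [] ++ (l.filter (fun p => p.2 == v)).map (·.1) := by
  intro l
  induction l with
  | nil => intro d v; simp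
  | cons p l ih =>
    intro d v
    rw [List.foldl_cons, ih]
    rw [PySem.Dict.getD_modify]
    by_cases hp : p.2 = v
    · rw [if_pos hp.symm, List.filter_cons, if_pos (by simp [hp]), List.map_cons,
        List.append_assoc, List.singleton_append, hp]
    · rw [if_neg (fun h => hp h.symm), List.filter_cons, if_neg (by simp [hp])]

-- val_idx[v] is the list of indices of v, in order
theorem valIdx_getD (a : List Int) (v : Int) :
    (solutionValIdx a).getD v []
      = ((PySem.List.enumerate a 0).filter (fun p => p.2 == v)).map (·.1) := by
  rw [solutionValIdx, foldModify_getD]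
  simp [PySem.Dict.getD_empty]

theorem pyGetD_append_left (xs ys : List Int) (i : Int) (h0 : 0 ≤ i) (h : i < (xs.length : Int)) :
    PySem.List.pyGetD (xs ++ ys) i 0 = PySem.List.pyGetD xs i 0 := by
  rw [PySem.List.pyGetD_eq_getElem _ _ h0 (by simp; omega),
    PySem.List.pyGetD_eq_getElem _ _ h0 (by omega)]
  exact List.getElem_append_left (by omega)

theorem pyGetD_concat_self (xs ys : List Int) (z : Int) :
    PySem.List.pyGetD (xs ++ z :: ys) ((xs.length : Int)) 0 = z := by
  rw [PySem.List.pyGetD_eq_getElem _ _ (by positivity) (by simp)]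
  simp

-- A's inner loop computes pvG, generalized over a processed prefix 'pre' of the array
theorem innerGen (v : Int) :
    ∀ (n : ℕ) (t pre : List Int), t.length ≤ n → ∀ (s c : Int) (b : Bool),
      s ≤ (pre.length : Int) →
      (b = true → 0 < pre.length ∧ s < (pre.length : Int) ∧
        PySem.List.pyGetD pre ((pre.length : Int) - 1) 0 ≠ v) →
      (b = false → s = (pre.length : Int) ∨
        (0 < pre.length ∧ PySem.List.pyGetD pre ((pre.length : Int) - 1) 0 = v)) →
      ((((PySem.List.enumerate t (pre.length : Int)).filter (fun p => p.2 == v)).map (·.1)).foldl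
          (solutionStep (pre ++ t) v) (s, c)).2 = c + pvG v b t := by
  intro n
  induction n with
  | zero =>
    intro t pre ht s c b hs hbt hbf
    cases t with
    | nil => simp [PySem.List.enumerate_nil, pvG_nil]
    | cons x r => simp at ht
  | succ n ih =>
    intro t pre ht s c b hs hbt hbf
    cases t with
    | nil => simp [PySem.List.enumerate_nil, pvG_nil]
    | cons x r =>
      rw [PySem.List.enumerate_cons]
      have hlen1 : (((pre ++ [x]).length : ℕ) : Int) = (pre.length : Int) + 1 := by
        simp
      by_cases hx : x = v
      · -- head index kept by the filter
        rw [List.filter_cons, if_pos (by simp [hx]), List.map_cons, List.foldl_cons]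
        cases b with
        | true =>
          obtain ⟨hpre, hsK, hlast⟩ := hbt rfl
          have hc1 : s < (pre.length : Int) ∧
              PySem.List.pyGetD (pre ++ x :: r) ((pre.length : Int) - 1) 0 ≠ v := by
            refine ⟨hsK, ?_⟩
            rw [pyGetD_append_left pre (x :: r) _ (by omega) (by omega)]
            exact hlast
          rw [solutionStep, if_pos hc1]
          have := ih r (pre ++ [x]) (by simp at ht ⊢; omega)
            ((pre.length : Int) + 1) (c + 2) false
            (by rw [hlen1]) (by simp) (by intro; left; rw [hlen1])
          rw [hlen1, List.append_assoc, List.singleton_append] at this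
          rw [this, pvG_left v x r hx]
          ring
        | false =>
          have hc1 : ¬(s < (pre.length : Int) ∧
              PySem.List.pyGetD (pre ++ x :: r) ((pre.length : Int) - 1) 0 ≠ v) := by
            rcases hbf rfl with h | ⟨hpre, hval⟩
            · rintro ⟨h1, -⟩; omega
            · rintro ⟨-, h2⟩
              rw [pyGetD_append_left pre (x :: r) _ (by omega) (by omega)] at h2
              exact h2 hval
          rw [solutionStep, if_neg hc1]
          cases r with
          | nil =>
            have hc2 : ¬((pre.length : Int) + 1 < (((pre ++ [x]).length : ℕ) : Int) ∧
                PySem.List.pyGetD (pre ++ [x]) ((pre.length : Int) + 1) 0 ≠ v) := by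
              rintro ⟨h1, -⟩; rw [hlen1] at h1; omega
            rw [if_neg hc2]
            simp [PySem.List.enumerate_nil, pvG_single v x hx]
          | cons y r' =>
            have hgetY : PySem.List.pyGetD (pre ++ x :: y :: r') ((pre.length : Int) + 1) 0
                = y := by
              have : pre ++ x :: y :: r' = (pre ++ [x]) ++ y :: r' := by simp
              rw [this, ← hlen1, pyGetD_concat_self]
            by_cases hy : y = v
            · have hc2 : ¬((pre.length : Int) + 1 < (((pre ++ x :: y :: r').length : ℕ) : Int) ∧
                  PySem.List.pyGetD (pre ++ x :: y :: r') ((pre.length : Int) + 1) 0 ≠ v) := by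
                rintro ⟨-, h2⟩; rw [hgetY] at h2; exact h2 hy
              rw [if_neg hc2]
              have := ih (y :: r') (pre ++ [x]) (by simp at ht ⊢; omega) s c false
                (by rw [hlen1]; omega)
                (by simp)
                (by intro; right
                    refine ⟨by simp, ?_⟩
                    have h1 : (((pre ++ [x]).length : ℕ) : Int) - 1 = (pre.length : Int) := by
                      rw [hlen1]; ring
                    rw [h1]
                    have h2 : pre ++ [x] = pre ++ x :: [] := rfl
                    rw [h2, pyGetD_concat_self]
                    exact hx)
              rw [hlen1, List.append_assoc, List.singleton_append] at this
              rw [this, pvG_skip v x y r' hx hy]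
            · have hc2 : ((pre.length : Int) + 1 < (((pre ++ x :: y :: r').length : ℕ) : Int) ∧
                  PySem.List.pyGetD (pre ++ x :: y :: r') ((pre.length : Int) + 1) 0 ≠ v) := by
                refine ⟨by simp, ?_⟩
                rw [hgetY]; exact hy
              rw [if_pos hc2]
              rw [PySem.List.enumerate_cons, List.filter_cons, if_neg (by simp [hy])]
              have hlen2 : (((pre ++ [x, y]).length : ℕ) : Int) = (pre.length : Int) + 1 + 1 := by
                simp
                ring
              have := ih r' (pre ++ [x, y]) (by simp at ht ⊢; omega)
                ((pre.length : Int) + 1 + 1) (c + 2) false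
                (by rw [hlen2]) (by simp) (by intro; left; rw [hlen2])
              rw [hlen2, List.append_assoc] at this
              simp only [List.cons_append, List.nil_append] at this
              simp only []
              rw [show (pre.length : Int) + 2 = (pre.length : Int) + 1 + 1 from by ring]
              rw [this, pvG_right v x y r' hx hy]
              ring
      · -- head index dropped by the filter
        rw [List.filter_cons, if_neg (by simp [hx])]
        have := ih r (pre ++ [x]) (by simp at ht ⊢; omega) s c true
          (by rw [hlen1]; omega)
          (by intro
              refine ⟨by simp, by rw [hlen1]; omega, ?_⟩
              have h1 : (pre.length : Int) + 1 - 1 = (pre.length : Int) := by ring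
              rw [hlen1, h1]
              have : pre ++ [x] = pre ++ x :: [] := rfl
              rw [this, pyGetD_concat_self]
              exact hx)
          (by simp)
        rw [hlen1, List.append_assoc, List.singleton_append] at this
        rw [this, pvG_cons_ne v x b r hx]

-- A's inner loop on val_idx[v] computes pvG v false a
theorem inner_eq_pvG (v : Int) (a : List Int) :
    (((solutionValIdx a).getD v []).foldl (solutionStep a v) (0, 0)).2 = pvG v false a := by
  rw [valIdx_getD]
  have := innerGen v a.length a [] le_rfl 0 0 false (by simp) (by simp) (by simp)
  simpa using this

-- a running max of values all ≤ ans is ans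
theorem foldl_max_const (f : Int → Int) :
    ∀ (l : List (Int × Int)) (ans : Int), (∀ p ∈ l, f p.1 ≤ ans) →
      l.foldl (fun ans p => max (f p.1) ans) ans = ans := by
  intro l
  induction l with
  | nil => intro ans _; rfl
  | cons p l ih =>
    intro ans h
    rw [List.foldl_cons, max_eq_right (h p (by simp))]
    exact ih ans (fun q hq => h q (by simp [hq]))

-- the break never changes the answer: the outer loop is a plain running max
theorem outer_eq_foldl (a : List Int) (d : PySem.Dict Int (List Int)) (f : Int → Int)
    (hf : ∀ v, ((d.getD v []).foldl (solutionStep a v) (0, 0)).2 = f v) :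
    ∀ (l : List (Int × Int)) (ans : Int), (∀ p ∈ l, f p.1 ≤ 2 * p.2) →
      l.Pairwise (fun p q => q.2 ≤ p.2) →
      solutionOuter a d ans l = l.foldl (fun ans p => max (f p.1) ans) ans := by
  intro l
  induction l with
  | nil => intro ans _ _; rfl
  | cons p l ih =>
    intro ans hb hp
    obtain ⟨v, vc⟩ := p
    rw [List.pairwise_cons] at hp
    by_cases h : ans ≥ vc * 2
    · rw [solutionOuter, if_pos h, foldl_max_const]
      intro q hq
      obtain ⟨w, wc⟩ := q
      rcases List.mem_cons.mp hq with h1 | h1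
      · have := hb (v, vc) List.mem_cons_self
        rw [h1]; simp at this ⊢; omega
      · have hb1 := hb (w, wc) (List.mem_cons_of_mem _ h1)
        have h2 := hp.1 (w, wc) h1
        simp at hb1 h2 ⊢; omega
    · rw [solutionOuter, if_neg h]
      simp only [hf]
      exact ih (max (f v) ans) (fun q hq => hb q (by simp [hq])) hp.2

-- ===== VERDICT (by name: the statement is the Claim_ definition above) =====
theorem solution_spec : Claim_equal_solution := by
  intro a _
  unfold Spec_solution solution solution_alt
  set f : Int → Int := fun v => pvG v false a with hfdef
  set items := PySem.Dict.items (PySem.Dict.counter a) with hitems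
  set cntMap := PySem.List.sorted items (fun p => p.2) true with hcnt
  have hf : ∀ v, (((solutionValIdx a).getD v []).foldl (solutionStep a v) (0, 0)).2 = f v :=
    fun v => inner_eq_pvG v a
  have hb : ∀ p ∈ cntMap, f p.1 ≤ 2 * p.2 := by
    intro p hpmem
    rw [hcnt, PySem.List.mem_sorted] at hpmem
    rw [hitems, PySem.Dict.items_counter] at hpmem
    obtain ⟨k, hk, rfl⟩ := List.mem_map.mp hpmem
    simpa [hfdef] using pvG_le k a.length a le_rfl false
  rw [outer_eq_foldl a (solutionValIdx a) f hf cntMap (-1) hb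
    (PySem.List.sorted_pairwise_rev items (fun p => p.2))]
  have hperm : cntMap.Perm items := PySem.List.sorted_perm items (fun p => p.2) true
  rw [@List.Perm.foldl_eq _ _ (fun ans p => max (f p.1) ans) _ _
    ⟨by intro b p q; simp [max_left_comm]⟩ hperm (-1)]
  rw [hitems, PySem.Dict.items_counter, List.foldl_map]
  refine PySem.List.foldl_congr_mem _ _ _ _ ?_
  intro acc x _
  rw [scan_eq_pvG x a.length a le_rfl 0, zero_add, max_comm]
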